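-- pv_equiv track=rewrite | github.com/jcschindler01/multipartite | src/multipartite/old/mptools.py | mind
-- ===== SOURCE A (Python) =====
-- def mind(n=[2,2], hold='xxxxx'):
--   ss = [''.join([str(i) for i in range(nn)]) for nn in n]
--   for i in range(len(n)):
--     if not hold[i] == 'x':
--       ss[i] = hold[i]
--   ijk= [x for x in ss[0]]
--   for s in ss[1:]:
--     ijk = [x+y for x in ijk for y in s]
--   return tuple(ijk)
-- ===== SOURCE B (Python) =====
-- def mind(n=[2,2], hold='xxxxx'):
--   ss = [''.join([str(i) for i in range(nn)]) for nn in n]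
--   opts = []
--   for i, s in enumerate(ss):
--     opts.append(hold[i] if hold[i] != 'x' else s)
--   total = 1
--   for s in opts:
--     total *= len(s)
--   out = []
--   for idx in range(total):
--     rem, place, parts = idx, total, []
--     for s in opts:
--       place //= len(s)
--       parts.append(s[rem // place])
--       rem %= place
--     out.append(''.join(parts))
--   return tuple(out)
-- ===== Notes on version B (the rewrite author's own statement) =====
-- stated objective: alternative
-- what changed: B builds the per-subsystem option strings the same way, then enumerates the Cartesian product by a single counter over range(total), decoding each index into per-subsystem digits with // and % place-value arithmetic, instead of A's repeated rebuilding of the whole partial-product list per subsystem.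
-- outside the precondition, e.g. on mind([], 'xxxxx'): A raises IndexError, B returns ('',); on mind([2, 2], 'x'): A raises IndexError, B raises IndexError
import Mathlib
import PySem

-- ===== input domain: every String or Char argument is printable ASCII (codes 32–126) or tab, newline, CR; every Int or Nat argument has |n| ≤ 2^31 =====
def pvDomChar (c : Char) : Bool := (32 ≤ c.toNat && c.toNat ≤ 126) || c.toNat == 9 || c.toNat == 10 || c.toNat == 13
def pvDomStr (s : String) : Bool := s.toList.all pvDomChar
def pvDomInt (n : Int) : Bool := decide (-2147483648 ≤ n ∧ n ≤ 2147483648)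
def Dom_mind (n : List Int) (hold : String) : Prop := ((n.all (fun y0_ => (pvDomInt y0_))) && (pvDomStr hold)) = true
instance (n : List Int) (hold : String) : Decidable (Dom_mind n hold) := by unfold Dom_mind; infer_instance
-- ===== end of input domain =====

-- B enumerates the Cartesian product by index arithmetic (one counter decoded into per-subsystem digits)
-- instead of A's repeated list-rebuilding fold; same return value, alternative algorithm of similar cost.

-- ===== PORT A =====
-- per-subsystem option strings: ''.join([str(i) for i in range(nn)]) for nn in n  (shared line of both sources)
def mindSS (n : List Int) : List String :=
  n.map (fun nn => PySem.Str.join "" ((PySem.List.pyRange 0 nn 1).map PySem.Int.toStr))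

-- body of A's hold-override loop: 'if not hold[i] == 'x': ss[i] = hold[i]' (hold[i] out of range = IndexError, excluded by Pre_)
def mindHoldStep (hold : String) (acc : List String) (i : Int) : List String :=
  match PySem.Str.pyGet? hold i with
  | some c => if ¬ (c = 'x') then PySem.List.pySetD acc i (String.singleton c) else acc
  | none => acc

-- body of A's product loop: 'ijk = [x+y for x in ijk for y in s]'
def mindProdStep (ijk : List String) (s : String) : List String :=
  ijk.flatMap (fun x => s.toList.map (fun y => x ++ String.singleton y))

def mind (n : List Int) (hold : String) : List String :=
  let ss := mindSS n
  let ss2 := (PySem.List.pyRange 0 (n.length : Int) 1).foldl (mindHoldStep hold) ss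
  match ss2 with
  | [] => []  -- Python raises IndexError on ss[0] here (n = []); excluded by Pre_
  | s0 :: rest => rest.foldl mindProdStep (s0.toList.map (fun x => String.singleton x))

-- ===== PORT B =====
-- 'hold[i] if hold[i] != 'x' else s' (hold[i] out of range = IndexError, excluded by Pre_)
def mindAltOpt (hold : String) (p : Int × String) : String :=
  match PySem.Str.pyGet? hold p.1 with
  | some c => if ¬ (c = 'x') then String.singleton c else p.2
  | none => p.2

-- body of B's per-index decode loop: place //= len(s); parts.append(s[rem // place]); rem %= place
-- (s[...] out of range would be an IndexError in Python; it is unreachable for idx in range(total))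
def mindDecodeStep (st : Int × Int × List String) (s : String) : Int × Int × List String :=
  let place := PySem.Int.floordiv st.2.1 (PySem.Str.len s)
  (PySem.Int.mod st.1 place, place,
    st.2.2 ++ [match PySem.Str.pyGet? s (PySem.Int.floordiv st.1 place) with
               | some c => String.singleton c
               | none => ""])

def mind_alt (n : List Int) (hold : String) : List String :=
  let ss := mindSS n
  let opts := (PySem.List.enumerate ss).foldl (fun acc p => acc ++ [mindAltOpt hold p]) []
  let total := opts.foldl (fun t s => t * PySem.Str.len s) 1
  (PySem.List.pyRange 0 total 1).foldl
    (fun out idx => out ++ [PySem.Str.join "" ((opts.foldl mindDecodeStep (idx, total, [])).2.2)]) []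

-- ===== PRECONDITION & SPEC =====
-- Pre_ excludes exactly the inputs where A raises IndexError: n = [] (A reads ss[0]) and
-- len(n) > len(hold) (A reads hold[i] for i = len(hold)).
def Pre_mind (n : List Int) (hold : String) : Prop := n ≠ [] ∧ n.length ≤ hold.toList.length
instance (n : List Int) (hold : String) : Decidable (Pre_mind n hold) := by unfold Pre_mind; infer_instance
def pvWitness_mind : List Int × String := ([2, 2], "xxxxx")

def Spec_mind (n : List Int) (hold : String) (out : List String) : Prop := out = mind_alt n hold
instance (n : List Int) (hold : String) (out : List String) : Decidable (Spec_mind n hold out) := by unfold Spec_mind; infer_instance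

-- ===== CLAIM (what is proved, stated in full; the proofs are below) =====
def Claim_equal_mind : Prop := ∀ (n : List Int) (hold : String), Dom_mind n hold → Pre_mind n hold → Spec_mind n hold (mind n hold)

-- ===== LEMMAS AND PROOFS =====

-- the common value both hold-override passes compute
def mindOpts (hold : String) (ss : List String) : List String :=
  (PySem.List.enumerate ss).map (mindAltOpt hold)

-- the specification product: all concatenations, most-significant subsystem first
def mindPS : List String → List String
  | [] => [""]
  | s :: rest => s.toList.flatMap (fun c => (mindPS rest).map (fun t => String.singleton c ++ t))

-- number of combinations
def mindTn (opts : List String) : Nat := (opts.map (fun s => s.toList.length)).prod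

lemma map_getD_range {α : Type} (l : List α) (d : α) :
    (List.range l.length).map (fun i => l.getD i d) = l := by
  induction l with
  | nil => simp
  | cons a l ih =>
    simp only [List.length_cons, List.range_succ_eq_map, List.map_cons, List.map_map]
    simpa using ih

lemma range_mul (L Tr : Nat) :
    List.range (L * Tr) = (List.range L).flatMap (fun q => (List.range Tr).map (fun r => q * Tr + r)) := by
  induction L with
  | zero => simp
  | succ L ih =>
    rw [Nat.succ_mul, List.range_add, ih, List.range_succ, List.flatMap_append]
    simp [Nat.mul_comm]

lemma join_empty_cons (a : String) (l : List String) :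
    PySem.Str.join "" (a :: l) = a ++ PySem.Str.join "" l := by
  apply String.toList_inj.mp
  cases l with
  | nil => simp [PySem.Str.toList_join, PySem.Chars.join_singleton, PySem.Chars.join_nil]
  | cons b l =>
    simp [PySem.Str.toList_join, PySem.Chars.join_cons_cons]

-- ---- A side ----

lemma A_fold (rest : List String) : ∀ init : List String,
    rest.foldl mindProdStep init = init.flatMap (fun x => (mindPS rest).map (fun t => x ++ t)) := by
  induction rest with
  | nil => intro init; simp [mindPS, String.append_empty]
  | cons s rest ih =>
    intro init
    rw [List.foldl_cons, ih]
    simp only [mindPS, mindProdStep, List.flatMap_assoc, List.map_flatMap, List.flatMap_map,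
      List.map_map]
    apply List.flatMap_congr
    intro x _
    apply List.flatMap_congr
    intro c _
    apply List.map_congr_left
    intro t _
    apply String.toList_inj.mp
    simp

lemma A_eq_PS (s0 : String) (rest : List String) :
    rest.foldl mindProdStep (s0.toList.map (fun x => String.singleton x)) = mindPS (s0 :: rest) := by
  rw [A_fold]
  simp only [mindPS, List.flatMap_map]

lemma set_append_cons {α : Type} (pre : List α) (x v : α) (rest : List α) :
    (pre ++ x :: rest).set pre.length v = pre ++ v :: rest := by
  induction pre with
  | nil => simp
  | cons a pre ih => simp [ih]

lemma hold_fold (hold : String) (ss : List String) : ∀ k : Nat, k ≤ ss.length →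
    (PySem.List.pyRange 0 (k : Int) 1).foldl (mindHoldStep hold) ss
      = mindOpts hold (ss.take k) ++ ss.drop k := by
  intro k
  induction k with
  | zero => intro _; simp [mindOpts, PySem.List.pyRange_zero_nat]
  | succ k ih =>
    intro hk
    have hk' : k < ss.length := by omega
    have : ((k : Nat) + 1 : Int) = (k : Int) + 1 := by push_cast; ring
    rw [show ((k + 1 : Nat) : Int) = (k : Int) + 1 by push_cast; ring,
      PySem.List.pyRange_one_succ_right (by positivity), List.foldl_append, ih (by omega)]
    have htake : ss.take (k + 1) = ss.take k ++ [ss[k]] := by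
      rw [List.take_succ]; simp [List.getElem?_eq_getElem hk']
    have hdrop : ss.drop k = ss[k] :: ss.drop (k + 1) := List.drop_eq_getElem_cons hk'
    have hlen : (mindOpts hold (ss.take k)).length = k := by
      simp [mindOpts, PySem.List.length_enumerate, List.length_take, Nat.min_eq_left (le_of_lt hk')]
    have hopts : mindOpts hold (ss.take (k + 1))
        = mindOpts hold (ss.take k) ++ [mindAltOpt hold ((k : Int), ss[k])] := by
      simp only [mindOpts]
      rw [htake, PySem.List.enumerate_append]
      simp [List.length_take, Nat.min_eq_left (le_of_lt hk'),
        PySem.List.enumerate_cons, PySem.List.enumerate_nil]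
    rw [hopts, hdrop]
    simp only [List.foldl_cons, List.foldl_nil, mindHoldStep, mindAltOpt]
    cases hget : PySem.Str.pyGet? hold (k : Int) with
    | none => simp
    | some c =>
      by_cases hc : c = 'x'
      · simp [hc]
      · have hsetd := set_append_cons (mindOpts hold (ss.take k)) ss[k] (String.singleton c)
            (ss.drop (k + 1))
        rw [hlen] at hsetd
        simp only [hc, not_false_eq_true, if_true, PySem.List.pySetD_natCast, hsetd,
          List.append_assoc, List.singleton_append]

-- ---- B side ----

lemma opts_fold (hold : String) (ss : List String) :
    (PySem.List.enumerate ss).foldl (fun acc p => acc ++ [mindAltOpt hold p]) [] = mindOpts hold ss := by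
  rw [PySem.List.foldl_append_singleton_eq_map]
  simp [mindOpts]

lemma total_fold (opts : List String) : ∀ a : Int,
    opts.foldl (fun t s => t * PySem.Str.len s) a = a * (mindTn opts : Int) := by
  induction opts with
  | nil => intro a; simp [mindTn]
  | cons s opts ih =>
    intro a
    rw [List.foldl_cons, ih]
    simp only [mindTn, List.map_cons, List.prod_cons, PySem.Str.len_eq]
    push_cast
    ring

lemma parts_shift (opts : List String) : ∀ (rem place : Int) (p0 : List String),
    opts.foldl mindDecodeStep (rem, place, p0)
      = ((opts.foldl mindDecodeStep (rem, place, [])).1,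
         (opts.foldl mindDecodeStep (rem, place, [])).2.1,
         p0 ++ (opts.foldl mindDecodeStep (rem, place, [])).2.2) := by
  induction opts with
  | nil => intro rem place p0; simp
  | cons s opts ih =>
    intro rem place p0
    simp only [List.foldl_cons]
    rw [show mindDecodeStep (rem, place, p0) s
        = ((mindDecodeStep (rem, place, []) s).1, (mindDecodeStep (rem, place, []) s).2.1,
           p0 ++ (mindDecodeStep (rem, place, []) s).2.2) from by simp [mindDecodeStep]]
    rw [ih ((mindDecodeStep (rem, place, []) s).1) ((mindDecodeStep (rem, place, []) s).2.1)
        (p0 ++ (mindDecodeStep (rem, place, []) s).2.2)]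
    conv_rhs => rw [ih ((mindDecodeStep (rem, place, []) s).1)
        ((mindDecodeStep (rem, place, []) s).2.1) ((mindDecodeStep (rem, place, []) s).2.2)]
    simp

lemma B_decode : ∀ opts : List String,
    (List.range (mindTn opts)).map
      (fun (k : Nat) => PySem.Str.join "" ((opts.foldl mindDecodeStep ((k : Int), ((mindTn opts : Nat) : Int), [])).2.2))
      = mindPS opts := by
  intro opts
  induction opts with
  | nil => simp [mindTn, mindPS]; decide
  | cons s rest ih =>
    have hT : mindTn (s :: rest) = s.toList.length * mindTn rest := by simp [mindTn]
    rw [hT, range_mul, List.map_flatMap]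
    have hmain : ∀ q ∈ List.range s.toList.length,
        ((List.range (mindTn rest)).map (fun r => q * mindTn rest + r)).map
          (fun (k : Nat) => PySem.Str.join ""
            (((s :: rest).foldl mindDecodeStep ((k : Int), ((s.toList.length * mindTn rest : Nat) : Int), [])).2.2))
        = (mindPS rest).map (fun t => String.singleton (s.toList.getD q ' ') ++ t) := by
      intro q hq
      rw [List.mem_range] at hq
      rw [List.map_map, ← ih, List.map_map]
      apply List.map_congr_left
      intro r hr
      rw [List.mem_range] at hr
      have hTr : 0 < mindTn rest := by omega
      have hL : 0 < s.toList.length := by omega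
      simp only [Function.comp_def, List.foldl_cons]
      have hstep : mindDecodeStep (((q * mindTn rest + r : Nat) : Int), ((s.toList.length * mindTn rest : Nat) : Int), []) s
          = (((r : Nat) : Int), ((mindTn rest : Nat) : Int), [String.singleton (s.toList.getD q ' ')]) := by
        simp only [mindDecodeStep, PySem.Str.len_eq]
        have hplace : PySem.Int.floordiv ((s.toList.length * mindTn rest : Nat) : Int) (s.toList.length : Int)
            = ((mindTn rest : Nat) : Int) := by
          rw [PySem.Int.floordiv_natCast]
          congr 1
          exact Nat.mul_div_cancel_left _ hL
        have hq' : (q * mindTn rest + r) / mindTn rest = q := by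
          rw [Nat.add_div_of_dvd_right ⟨q, Nat.mul_comm _ _⟩, Nat.mul_div_cancel _ hTr,
            Nat.div_eq_of_lt hr, Nat.add_zero]
        have hr' : (q * mindTn rest + r) % mindTn rest = r := by
          rw [Nat.add_comm, Nat.add_mul_mod_self_right, Nat.mod_eq_of_lt hr]
        rw [hplace, PySem.Int.floordiv_natCast, PySem.Int.mod_natCast, hq', hr']
        simp [List.getElem?_eq_getElem hq, List.getD_eq_getElem, hq]
      rw [hstep]
      rw [parts_shift rest (((r : Nat) : Int)) (((mindTn rest : Nat) : Int))
        [String.singleton (s.toList.getD q ' ')]]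
      dsimp only
      rw [List.singleton_append, join_empty_cons]
    rw [List.flatMap_congr hmain]
    have hps : mindPS (s :: rest)
        = s.toList.flatMap (fun c => (mindPS rest).map (fun t => String.singleton c ++ t)) := rfl
    rw [hps]
    conv_rhs => rw [← map_getD_range s.toList ' ', List.flatMap_map]

-- ---- assembly ----

lemma mind_alt_eval (n : List Int) (hold : String) :
    mind_alt n hold = mindPS (mindOpts hold (mindSS n)) := by
  simp only [mind_alt]
  rw [opts_fold]
  rw [PySem.List.foldl_append_singleton_eq_map
    (f := fun idx => PySem.Str.join ""
      (((mindOpts hold (mindSS n)).foldl mindDecodeStep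
        (idx, (mindOpts hold (mindSS n)).foldl (fun t s => t * PySem.Str.len s) 1, [])).2.2))]
  rw [total_fold _ 1, one_mul, List.nil_append, PySem.List.pyRange_one]
  simp only [sub_zero, Int.toNat_natCast, List.map_map, zero_add]
  rw [← B_decode (mindOpts hold (mindSS n))]
  rfl

lemma mind_eval (n : List Int) (hold : String) (hne : n ≠ []) :
    mind n hold = mindPS (mindOpts hold (mindSS n)) := by
  simp only [mind]
  have hlen : (mindSS n).length = n.length := by simp [mindSS]
  rw [show (n.length : Int) = ((mindSS n).length : Nat) by rw [hlen]]
  rw [hold_fold hold (mindSS n) (mindSS n).length (le_refl _)]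
  simp only [List.take_length, List.drop_length, List.append_nil]
  have hlen2 : (mindOpts hold (mindSS n)).length = n.length := by
    simp [mindOpts, PySem.List.length_enumerate, hlen]
  cases hopts : mindOpts hold (mindSS n) with
  | nil =>
    rw [hopts] at hlen2
    exact absurd (List.length_eq_zero_iff.mp hlen2.symm) hne
  | cons s0 rest => exact A_eq_PS s0 rest

-- ===== VERDICT (by name: the statement is the Claim_ definition above) =====
theorem mind_spec : Claim_equal_mind := by
  intro n hold _ hpre
  unfold Spec_mind
  rw [mind_eval n hold hpre.1, mind_alt_eval]
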